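-- pv_equiv track=rewrite | github.com/awslabs/osml-model-runner | src/aws_oversightml_model_runner/gdal/gdal_utils.py | select_extension
-- ===== SOURCE A (Python) =====
-- from typing import Dict, List, Optional, Tuple
--
-- def select_extension(image_path: str, possible_extensions: List[str]) -> str:
--     selected_extension = "UNKNOWN"
--     for i, possible_extension in enumerate(possible_extensions):
--         if i == 0:
--             selected_extension = possible_extension.upper()
--         elif f".{possible_extension}".upper() in image_path.upper():
--             selected_extension = possible_extension.upper()
--     return selected_extension
-- ===== SOURCE B (Python) =====
-- def select_extension(image_path: str, possible_extensions):
--     if not possible_extensions: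
--         return "UNKNOWN"
--     haystack = image_path.upper()
--     for ext in reversed(possible_extensions[1:]):
--         if f".{ext}".upper() in haystack:
--             return ext.upper()
--     return possible_extensions[0].upper()
-- ===== Notes on version B (the rewrite author's own statement) =====
-- stated objective: simpler
-- what changed: B guards the empty list, then scans the tail in reverse and returns the first (i.e. last-in-order) matching extension via short-circuit return, falling back to the head as default, instead of A's enumerate loop with an i==0 special case and a variable overwritten on every match.
import Mathlib
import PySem

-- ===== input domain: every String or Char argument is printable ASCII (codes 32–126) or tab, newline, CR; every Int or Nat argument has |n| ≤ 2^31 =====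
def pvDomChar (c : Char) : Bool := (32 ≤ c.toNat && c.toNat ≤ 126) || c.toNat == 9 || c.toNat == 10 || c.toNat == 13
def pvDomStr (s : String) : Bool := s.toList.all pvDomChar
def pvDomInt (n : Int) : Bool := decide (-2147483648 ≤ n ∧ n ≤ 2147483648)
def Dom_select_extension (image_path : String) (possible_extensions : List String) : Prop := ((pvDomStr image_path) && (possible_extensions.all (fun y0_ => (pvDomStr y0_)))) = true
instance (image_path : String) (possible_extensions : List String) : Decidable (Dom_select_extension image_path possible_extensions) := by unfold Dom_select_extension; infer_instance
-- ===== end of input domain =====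

-- B replaces A's enumerate/i==0 forward scan with an empty-list guard plus a reversed-tail first-match short-circuit; objective: simpler.


-- ===== PORT A =====
def select_extension (image_path : String) (possible_extensions : List String) : String :=
  (PySem.List.enumerate possible_extensions).foldl
    (fun selected_extension p =>
      if p.1 == 0 then PySem.Str.upper p.2
      else if PySem.Str.isIn (PySem.Str.upper ("." ++ p.2)) (PySem.Str.upper image_path) then
        PySem.Str.upper p.2
      else selected_extension)
    "UNKNOWN"

-- ===== PORT B =====
-- B: guard empty list, scan the tail in reverse, return first match (short-circuit), else head default.
def select_extension_alt (image_path : String) (possible_extensions : List String) : String :=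
  match possible_extensions with
  | [] => "UNKNOWN"
  | d :: rest =>
    match rest.reverse.find? (fun ext => PySem.Str.isIn (PySem.Str.upper ("." ++ ext)) (PySem.Str.upper image_path)) with
    | some ext => PySem.Str.upper ext
    | none => PySem.Str.upper d

-- ===== PRECONDITION & SPEC =====
def Spec_select_extension (image_path : String) (possible_extensions : List String) (out : String) : Prop := out = select_extension_alt image_path possible_extensions
instance (image_path : String) (possible_extensions : List String) (out : String) : Decidable (Spec_select_extension image_path possible_extensions out) := by unfold Spec_select_extension; infer_instance

-- ===== CLAIM (what is proved, stated in full; the proofs are below) =====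
def Claim_equal_select_extension : Prop := ∀ (image_path : String) (possible_extensions : List String), Dom_select_extension image_path possible_extensions → Spec_select_extension image_path possible_extensions (select_extension image_path possible_extensions)

-- ===== LEMMAS AND PROOFS =====

-- ===== VERDICT (by name: the statement is the Claim_ definition above) =====
-- last-match-wins over the enumerated tail (all indices ≥ 1) equals first match of the reversed tail
theorem pv_tail_lastmatch (g : String → Bool) (u : String → String) :
    ∀ (rest : List String) (s : Int), 1 ≤ s → ∀ (init : String),
      (PySem.List.enumerate rest s).foldl
        (fun acc q => if q.1 == 0 then u q.2 else if g q.2 then u q.2 else acc) init =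
        (match rest.reverse.find? g with
         | some e => u e
         | none => init) := by
  intro rest
  induction rest with
  | nil => intro s hs init; simp [PySem.List.enumerate]
  | cons e r ih =>
    intro s hs init
    rw [PySem.List.enumerate_cons]
    have h0 : (s == 0) = false := by simp; omega
    simp only [List.foldl_cons, h0, Bool.false_eq_true, if_false, List.reverse_cons,
      List.find?_append]
    rw [ih (s + 1) (by omega)]
    cases h : r.reverse.find? g with
    | some x => simp
    | none =>
      by_cases hp : g e = true <;> simp [hp, List.find?]

theorem select_extension_spec : Claim_equal_select_extension := by
  intro image_path possible_extensions _
  unfold Spec_select_extension select_extension select_extension_alt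
  cases possible_extensions with
  | nil => simp [PySem.List.enumerate]
  | cons d rest =>
    rw [PySem.List.enumerate_cons]
    simp only [List.foldl_cons, if_pos (by decide : ((0 : Int) == 0) = true)]
    rw [pv_tail_lastmatch
      (fun ext => PySem.Str.isIn (PySem.Str.upper ("." ++ ext)) (PySem.Str.upper image_path))
      PySem.Str.upper rest (0 + 1) (by omega)]
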